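-- pv_equiv track=rewrite | github.com/arjun-christopher/Resume-Analysis-Agent | app/raglib/chunking.py | section_blocks
-- ===== SOURCE A (Python) =====
-- from typing import List, Dict
--
-- SECTION_HEADS = ["experience","work","skills","education","projects","summary","responsibilities"]
--
-- def section_blocks(text: str) -> List[Dict]:
--     lines = text.splitlines()
--     blocks, cur, sec = [], [], "other"
--     for line in lines:
--         low = line.strip().lower()
--         if any(h in low for h in SECTION_HEADS) and len(line) < 80:
--             if cur:
--                 blocks.append({"section": sec, "text": "\n".join(cur)})
--                 cur = []
--             sec = low
--         cur.append(line)
--     if cur: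
--         blocks.append({"section": sec, "text": "\n".join(cur)})
--     return blocks
-- ===== SOURCE B (Python) =====
-- SECTION_HEADS = ["experience","work","skills","education","projects","summary","responsibilities"]
--
-- def _is_head(line):
--     low = line.strip().lower()
--     return any(h in low for h in SECTION_HEADS) and len(line) < 80
--
-- def section_blocks(text):
--     # block-at-a-time: each block starts at line 0 or at a header line and
--     # extends up to (excluding) the next header line
--     lines = text.splitlines()
--     blocks = []
--     i, n = 0, len(lines)
--     while i < n:
--         line = lines[i]
--         label = line.strip().lower() if _is_head(line) else "other"
--         j = i + 1
--         while j < n and not _is_head(lines[j]):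
--             j += 1
--         blocks.append({"section": label, "text": "\n".join(lines[i:j])})
--         i = j
--     return blocks
-- ===== Notes on version B (the rewrite author's own statement) =====
-- stated objective: alternative
-- what changed: A streams lines through a flush-on-header accumulator (cur/sec state); B emits one block per outer step by scanning forward to the next header line and slicing/joining that segment directly.
import Mathlib
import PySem

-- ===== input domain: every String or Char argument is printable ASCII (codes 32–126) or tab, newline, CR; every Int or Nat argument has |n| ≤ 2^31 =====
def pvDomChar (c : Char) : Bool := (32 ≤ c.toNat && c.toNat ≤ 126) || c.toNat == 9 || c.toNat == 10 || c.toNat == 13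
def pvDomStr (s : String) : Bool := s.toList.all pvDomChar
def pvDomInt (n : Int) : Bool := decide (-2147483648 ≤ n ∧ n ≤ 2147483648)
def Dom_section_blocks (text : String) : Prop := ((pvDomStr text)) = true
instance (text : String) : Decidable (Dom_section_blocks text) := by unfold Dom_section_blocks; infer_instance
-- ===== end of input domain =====

-- B replaces A's flush-on-header accumulator with a block-at-a-time scan to the next header; same O(n) cost, no speed claim.

def pvHeads : List String := ["experience","work","skills","education","projects","summary","responsibilities"]

-- ===== PORT A =====
def section_blocks (text : String) : List (List (String × String)) :=
  let lines := PySem.Str.splitlines text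
  let fin := lines.foldl (fun (st : List (List (String × String)) × List String × String) line =>
      let blocks := st.1
      let cur := st.2.1
      let sec := st.2.2
      let low := PySem.Str.lower (PySem.Str.strip line)
      if (pvHeads.any (fun h => PySem.Str.isIn h low)) && decide (PySem.Str.len line < 80) then
        ((if cur = [] then blocks
          else blocks ++ [[("section", sec), ("text", PySem.Str.join "\n" cur)]]), [line], low)
      else (blocks, cur ++ [line], sec))
    ([], [], "other")
  if fin.2.1 = [] then fin.1
  else fin.1 ++ [[("section", fin.2.2), ("text", PySem.Str.join "\n" fin.2.1)]]

-- ===== PORT B =====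
def pvIsHead (line : String) : Bool :=
  (pvHeads.any (fun h => PySem.Str.isIn h (PySem.Str.lower (PySem.Str.strip line)))) &&
    decide (PySem.Str.len line < 80)

-- the inner 'while j < n and not _is_head(lines[j]): j += 1' scan, as the split it produces
def pvSpanNH : List String → List String × List String
  | [] => ([], [])
  | x :: xs =>
    if pvIsHead x then ([], x :: xs)
    else
      let p := pvSpanNH xs
      (x :: p.1, p.2)

theorem pvSpanNH_len (xs : List String) : (pvSpanNH xs).2.length ≤ xs.length := by
  induction xs with
  | nil => simp [pvSpanNH]
  | cons x xs ih =>
    simp only [pvSpanNH]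
    split
    · simp
    · simpa using Nat.le_succ_of_le ih

-- the outer 'while i < n' loop: one block per iteration
def pvAltGo : List String → List (List (String × String))
  | [] => []
  | line :: rest =>
    let label := if pvIsHead line then PySem.Str.lower (PySem.Str.strip line) else "other"
    let seg := (pvSpanNH rest).1
    let rest' := (pvSpanNH rest).2
    [("section", label), ("text", PySem.Str.join "\n" (line :: seg))] :: pvAltGo rest'
termination_by lines => lines.length
decreasing_by
  exact Nat.lt_succ_of_le (pvSpanNH_len rest)

def section_blocks_alt (text : String) : List (List (String × String)) :=
  pvAltGo (PySem.Str.splitlines text)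

-- ===== PRECONDITION & SPEC =====
def Spec_section_blocks (text : String) (out : List (List (String × String))) : Prop := out = section_blocks_alt text
instance (text : String) (out : List (List (String × String))) : Decidable (Spec_section_blocks text out) := by unfold Spec_section_blocks; infer_instance

-- ===== CLAIM (what is proved, stated in full; the proofs are below) =====
def Claim_equal_section_blocks : Prop := ∀ (text : String), Dom_section_blocks text → Spec_section_blocks text (section_blocks text)

-- ===== LEMMAS AND PROOFS =====

def pvFinish (st : List (List (String × String)) × List String × String) :
    List (List (String × String)) :=
  if st.2.1 = [] then st.1
  else st.1 ++ [[("section", st.2.2), ("text", PySem.Str.join "\n" st.2.1)]]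

def pvStep (st : List (List (String × String)) × List String × String) (line : String) :
    List (List (String × String)) × List String × String :=
  if pvIsHead line then
    ((if st.2.1 = [] then st.1
      else st.1 ++ [[("section", st.2.2), ("text", PySem.Str.join "\n" st.2.1)]]), [line],
      PySem.Str.lower (PySem.Str.strip line))
  else (st.1, st.2.1 ++ [line], st.2.2)

theorem pv_sb_eq (text : String) :
    section_blocks text = pvFinish ((PySem.Str.splitlines text).foldl pvStep ([], [], "other")) := rfl

theorem pvSpanNH_eq (xs : List String) :
    pvSpanNH xs = (xs.takeWhile (fun x => !pvIsHead x), xs.dropWhile (fun x => !pvIsHead x)) := by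
  induction xs with
  | nil => simp [pvSpanNH]
  | cons x xs ih =>
    simp only [pvSpanNH, List.takeWhile, List.dropWhile]
    cases h : pvIsHead x <;> simp [ih]

theorem pvFold_inv (lines : List String) :
    ∀ (blocks : List (List (String × String))) (cur : List String) (sec : String),
      cur ≠ [] →
      pvFinish (lines.foldl pvStep (blocks, cur, sec)) =
        blocks ++ [[("section", sec),
            ("text", PySem.Str.join "\n" (cur ++ lines.takeWhile (fun x => !pvIsHead x)))]]
          ++ pvAltGo (lines.dropWhile (fun x => !pvIsHead x)) := by
  induction lines with
  | nil =>
    intro blocks cur sec hcur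
    simp [pvFinish, pvAltGo, hcur]
  | cons l ls ih =>
    intro blocks cur sec hcur
    cases h : pvIsHead l with
    | true =>
      have hstep : pvStep (blocks, cur, sec) l =
          (blocks ++ [[("section", sec), ("text", PySem.Str.join "\n" cur)]], [l],
            PySem.Str.lower (PySem.Str.strip l)) := by
        simp [pvStep, h, hcur]
      rw [List.foldl_cons, hstep, ih _ [l] _ (by simp)]
      simp [List.takeWhile, List.dropWhile, h, pvAltGo, pvSpanNH_eq]
    | false =>
      have hstep : pvStep (blocks, cur, sec) l = (blocks, cur ++ [l], sec) := by
        simp [pvStep, h]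
      rw [List.foldl_cons, hstep, ih _ (cur ++ [l]) _ (by simp)]
      simp [List.takeWhile, List.dropWhile, h]

-- ===== VERDICT (by name: the statement is the Claim_ definition above) =====
theorem section_blocks_spec : Claim_equal_section_blocks := by
  intro text _
  show section_blocks text = section_blocks_alt text
  rw [pv_sb_eq]
  unfold section_blocks_alt
  cases hl : PySem.Str.splitlines text with
  | nil => simp [pvFinish, pvAltGo]
  | cons l ls =>
    cases h : pvIsHead l with
    | true =>
      have hstep : pvStep ([], [], "other") l = ([], [l], PySem.Str.lower (PySem.Str.strip l)) := by
        simp [pvStep, h]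
      rw [List.foldl_cons, hstep, pvFold_inv ls _ [l] _ (by simp)]
      simp [pvAltGo, pvSpanNH_eq, h]
    | false =>
      have hstep : pvStep ([], [], "other") l = ([], [l], "other") := by
        simp [pvStep, h]
      rw [List.foldl_cons, hstep, pvFold_inv ls _ [l] _ (by simp)]
      simp [pvAltGo, pvSpanNH_eq, h]
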